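-- pv_equiv track=rewrite | github.com/EIDOSLAB/KD_and_CAC | tavi-prediction/run_metadata_extraction_calcium_rx.py | get_trivial_keys
-- ===== SOURCE A (Python) =====
-- def get_trivial_keys(keys, metadata):
--     # remove keys that are equal for all patients and put on a separate file
--     trivial_keys = dict()
--     for key in keys:
--         all_equals = True
--         value = None
--         for patient in metadata.keys():
--             try:
--                 if value is None:
--                     value = metadata[patient][key]
--                 elif value != metadata[patient][key]:
--                     raise Exception('values are different')
--             except:
--                 all_equals = False
--                 break
--         if all_equals == True:
--             trivial_keys[key] = value
--     return trivial_keys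
-- ===== SOURCE B (Python) =====
-- def get_trivial_keys(keys, metadata):
--     # Inverted loop nesting: one pass over patients (outer), and an 'active' list of
--     # still-qualifying keys (inner) that shrinks as keys get disqualified.
--     candidate = {}
--     active = list(dict.fromkeys(keys))
--     for pdata in metadata.values():
--         still = []
--         for key in active:
--             try:
--                 v = pdata[key]
--             except Exception:
--                 continue
--             if key not in candidate:
--                 candidate[key] = v
--                 still.append(key)
--             elif candidate[key] == v:
--                 still.append(key)
--         active = still
--     alive = set(active)
--     return {k: candidate.get(k) for k in keys if k in alive}
-- ===== Notes on version B (the rewrite author's own statement) =====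
-- stated objective: alternative
-- what changed: Loop nesting is inverted: instead of a per-key scan over all patients with an early break, B makes one pass over patients maintaining a candidate dict and a shrinking 'active' list of still-qualifying keys, then emits surviving keys in key order.
-- outside the precondition, e.g. on get_trivial_keys(['a'], {}): A returns {'a': None}, B returns {'a': None}
import Mathlib
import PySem

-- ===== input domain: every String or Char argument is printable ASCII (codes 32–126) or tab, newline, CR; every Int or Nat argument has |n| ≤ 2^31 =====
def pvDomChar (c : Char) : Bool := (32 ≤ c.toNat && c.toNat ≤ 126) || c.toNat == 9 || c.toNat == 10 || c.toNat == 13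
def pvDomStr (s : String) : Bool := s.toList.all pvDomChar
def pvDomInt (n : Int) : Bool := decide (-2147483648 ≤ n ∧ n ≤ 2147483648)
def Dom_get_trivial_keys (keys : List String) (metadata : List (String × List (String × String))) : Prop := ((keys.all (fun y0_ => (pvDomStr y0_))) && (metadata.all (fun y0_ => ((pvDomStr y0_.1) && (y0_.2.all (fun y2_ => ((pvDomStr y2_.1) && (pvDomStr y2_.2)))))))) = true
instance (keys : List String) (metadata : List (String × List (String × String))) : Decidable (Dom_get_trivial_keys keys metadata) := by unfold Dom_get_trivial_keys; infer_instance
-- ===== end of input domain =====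

-- B inverts A's loop nesting: one pass over patients with a candidate dict and a shrinking
-- 'active' key list, instead of A's per-key scan over all patients with an early break.

-- ===== PORT A =====
-- the dict-of-dicts the Python function receives (the assoc-list input converted with Python's dict semantics)
def pvMd (metadata : List (String × List (String × String))) : PySem.Dict String (PySem.Dict String String) :=
  PySem.Dict.ofList (metadata.map (fun pr => (pr.1, PySem.Dict.ofList pr.2)))

-- A's inner 'for patient in metadata.keys(): …' with its try/except and break
def pvA_inner (md : PySem.Dict String (PySem.Dict String String)) (key : String) :
    List String → Option String → Bool × Option String
  | [], value => (true, value)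
  | p :: ps, value =>
    match (PySem.Dict.get? md p).bind (fun d => PySem.Dict.get? d key) with
    | none => (false, value)                    -- KeyError → except → all_equals = False; break
    | some w =>
      match value with
      | none => pvA_inner md key ps (some w)
      | some c =>
        if c = w then pvA_inner md key ps (some c)
        else (false, value)                     -- raise → except → all_equals = False; break

def get_trivial_keys (keys : List String) (metadata : List (String × List (String × String))) :
    List (String × String) :=
  (keys.foldl (fun (tk : PySem.Dict String String) key =>
      match pvA_inner (pvMd metadata) key (PySem.Dict.keys (pvMd metadata)) none with
      | (true, some v) => tk.insert key v
      | (true, none) => tk      -- Python stores None here; only reachable when metadata = {} (outside Pre_)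
      | (false, _) => tk) PySem.Dict.empty).items

-- ===== PORT B =====
-- B's inner 'for key in active: …' body: candidate update plus 'still.append(key)'
def pvB_procKey (row : PySem.Dict String String)
    (st : PySem.Dict String String × List String) (key : String) :
    PySem.Dict String String × List String :=
  match PySem.Dict.get? row key with
  | none => st                                  -- KeyError → except → key dropped
  | some v =>
    match PySem.Dict.get? st.1 key with
    | none => (PySem.Dict.insert st.1 key v, st.2 ++ [key])
    | some c => if c = v then (st.1, st.2 ++ [key]) else st

-- B's outer loop: (candidate, active) after the single pass over the patients
def pvB_state (keys : List String) (metadata : List (String × List (String × String))) :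
    PySem.Dict String String × List String :=
  (PySem.Dict.values (pvMd metadata)).foldl
    (fun st row => st.2.foldl (pvB_procKey row) (st.1, ([] : List String)))
    (PySem.Dict.empty, PySem.List.dedup keys)

def get_trivial_keys_alt (keys : List String) (metadata : List (String × List (String × String))) :
    List (String × String) :=
  (keys.foldl (fun (out : PySem.Dict String String) k =>
      if PySem.Set.contains (PySem.Set.ofList (pvB_state keys metadata).2) k then
        match PySem.Dict.get? (pvB_state keys metadata).1 k with
        | some v => PySem.Dict.insert out k v
        | none => out    -- Python's candidate.get(k) is None here; only reachable when metadata = {} (outside Pre_)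
      else out) PySem.Dict.empty).items

-- ===== PRECONDITION & SPEC =====
-- Pre_ excludes only empty metadata: there A returns a dict mapping every key to None,
-- which is not a value of the declared string-valued result type.
def Pre_get_trivial_keys (keys : List String) (metadata : List (String × List (String × String))) : Prop :=
  metadata ≠ []
instance (keys : List String) (metadata : List (String × List (String × String))) : Decidable (Pre_get_trivial_keys keys metadata) := by unfold Pre_get_trivial_keys; infer_instance

def pvWitness_get_trivial_keys : List String × (List (String × List (String × String))) :=
  (["age", "sex"], [("p1", [("age", "63"), ("sex", "M")]), ("p2", [("age", "63"), ("sex", "F")])])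

def Spec_get_trivial_keys (keys : List String) (metadata : List (String × List (String × String))) (out : List (String × String)) : Prop := out = get_trivial_keys_alt keys metadata
instance (keys : List String) (metadata : List (String × List (String × String))) (out : List (String × String)) : Decidable (Spec_get_trivial_keys keys metadata out) := by unfold Spec_get_trivial_keys; infer_instance

-- ===== CLAIM (what is proved, stated in full; the proofs are below) =====
def Claim_equal_get_trivial_keys : Prop := ∀ (keys : List String) (metadata : List (String × List (String × String))), Dom_get_trivial_keys keys metadata → Pre_get_trivial_keys keys metadata → Spec_get_trivial_keys keys metadata (get_trivial_keys keys metadata)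

-- ===== LEMMAS AND PROOFS =====

-- the per-key pure step both loops implement: state = (candidate value, disqualified flag)
def pvPhi (s : Option String × Bool) (o : Option String) : Option String × Bool :=
  if s.2 then s
  else
    match o with
    | none => (s.1, true)
    | some v =>
      match s.1 with
      | none => (some v, false)
      | some c => if c = v then s else (s.1, true)

lemma pvPhi_frozen (s : Option String × Bool) (h : s.2 = true) (ops : List (Option String)) :
    ops.foldl pvPhi s = s := by
  induction ops with
  | nil => rfl
  | cons o t ih => simp [List.foldl, pvPhi, h, ih]

-- A's inner loop computes pvPhi's fold: same qualification flag, and the same value when qualified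
lemma pvA_inner_phi (md : PySem.Dict String (PySem.Dict String String)) (key : String)
    (ps : List String) (value : Option String) :
    (pvA_inner md key ps value).1
        = !((ps.map (fun p => (PySem.Dict.get? md p).bind (fun d => PySem.Dict.get? d key))).foldl pvPhi (value, false)).2
    ∧ ((pvA_inner md key ps value).1 = true →
        (pvA_inner md key ps value).2
          = ((ps.map (fun p => (PySem.Dict.get? md p).bind (fun d => PySem.Dict.get? d key))).foldl pvPhi (value, false)).1) := by
  induction ps generalizing value with
  | nil => simp [pvA_inner]
  | cons p t ih =>
    simp only [pvA_inner, List.map_cons, List.foldl_cons]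
    cases hpd : (PySem.Dict.get? md p).bind (fun d => PySem.Dict.get? d key) with
    | none =>
      simp only [pvPhi]
      rw [pvPhi_frozen _ rfl]
      simp
    | some w =>
      cases value with
      | none => simpa [pvPhi] using ih (some w)
      | some c =>
        by_cases hcw : c = w
        · subst hcw; simpa [pvPhi] using ih (some c)
        · simp only [hcw, if_false]
          have h1 : pvPhi (some c, false) (some w) = (some c, true) := by simp [pvPhi, hcw]
          rw [h1, pvPhi_frozen _ rfl]
          simp

-- B's inner loop, 'still' component: the active keys surviving this row, in order
lemma pvRow_snd (row : PySem.Dict String String) (act : List String) (hnd : act.Nodup) :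
    ∀ (cand : PySem.Dict String String) (acc : List String),
    (act.foldl (pvB_procKey row) (cand, acc)).2
      = acc ++ act.filter (fun k => !(pvPhi (PySem.Dict.get? cand k, false) (PySem.Dict.get? row k)).2) := by
  induction act with
  | nil => simp
  | cons key t ih =>
    intro cand acc
    have hknt : key ∉ t := (List.nodup_cons.mp hnd).1
    have hndt : t.Nodup := (List.nodup_cons.mp hnd).2
    simp only [List.foldl_cons, List.filter_cons]
    cases hr : PySem.Dict.get? row key with
    | none =>
      simp only [pvB_procKey, hr]
      rw [ih hndt cand acc]
      simp [pvPhi, hr]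
    | some v =>
      cases hc : PySem.Dict.get? cand key with
      | none =>
        simp only [pvB_procKey, hr, hc]
        rw [ih hndt (PySem.Dict.insert cand key v) (acc ++ [key])]
        have hfc : ∀ x ∈ t, (!(pvPhi (PySem.Dict.get? (PySem.Dict.insert cand key v) x, false) (PySem.Dict.get? row x)).2)
            = (!(pvPhi (PySem.Dict.get? cand x, false) (PySem.Dict.get? row x)).2) := by
          intro x hx
          rw [PySem.Dict.get?_insert_of_ne cand v (by rintro rfl; exact hknt hx)]
        rw [List.filter_congr hfc]
        simp [pvPhi, hr, hc]
      | some c =>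
        by_cases hcv : c = v
        · subst hcv
          simp only [pvB_procKey, hr, hc]
          simp only [if_true]
          rw [ih hndt cand (acc ++ [key])]
          simp [pvPhi, hr, hc]
        · simp only [pvB_procKey, hr, hc, if_neg hcv]
          rw [ih hndt cand acc]
          simp [pvPhi, hr, hc, hcv]

-- B's inner loop, candidate component: a pvPhi step at every still-active key
lemma pvRow_fst (row : PySem.Dict String String) (act : List String) (hnd : act.Nodup) :
    ∀ (cand : PySem.Dict String String) (acc : List String) (k : String),
    PySem.Dict.get? (act.foldl (pvB_procKey row) (cand, acc)).1 k
      = if k ∈ act then (pvPhi (PySem.Dict.get? cand k, false) (PySem.Dict.get? row k)).1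
        else PySem.Dict.get? cand k := by
  induction act with
  | nil => simp
  | cons key t ih =>
    intro cand acc k
    have hknt : key ∉ t := (List.nodup_cons.mp hnd).1
    have hndt : t.Nodup := (List.nodup_cons.mp hnd).2
    simp only [List.foldl_cons, List.mem_cons]
    cases hr : PySem.Dict.get? row key with
    | none =>
      simp only [pvB_procKey, hr]
      rw [ih hndt cand acc k]
      by_cases hk : k = key
      · subst hk
        simp [hknt, pvPhi, hr]
      · simp [hk]
    | some v =>
      cases hc : PySem.Dict.get? cand key with
      | none =>
        simp only [pvB_procKey, hr, hc]
        rw [ih hndt (PySem.Dict.insert cand key v) (acc ++ [key]) k]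
        by_cases hk : k = key
        · subst hk
          simp [hknt, pvPhi, hr, hc, PySem.Dict.get?_insert_self]
        · rw [PySem.Dict.get?_insert_of_ne cand v hk]
          simp [hk]
      | some c =>
        by_cases hcv : c = v
        · subst hcv
          simp only [pvB_procKey, hr, hc]
          simp only [if_true]
          rw [ih hndt cand (acc ++ [key]) k]
          by_cases hk : k = key
          · subst hk; simp [hknt, pvPhi, hr, hc]
          · simp [hk]
        · simp only [pvB_procKey, hr, hc, if_neg hcv]
          rw [ih hndt cand acc k]
          by_cases hk : k = key
          · subst hk; simp [hknt, pvPhi, hr, hc, hcv]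
          · simp [hk]

-- B's outer loop: 'active' filters the initial keys by the pvPhi fold, 'candidate' holds its value
lemma pvOuter (rows : List (PySem.Dict String String)) :
    ∀ (cand : PySem.Dict String String) (act : List String), act.Nodup →
    ((rows.foldl (fun st row => st.2.foldl (pvB_procKey row) (st.1, ([] : List String))) (cand, act)).2
       = act.filter (fun k => !((rows.map (fun r => PySem.Dict.get? r k)).foldl pvPhi (PySem.Dict.get? cand k, false)).2))
    ∧ ∀ k, PySem.Dict.get? (rows.foldl (fun st row => st.2.foldl (pvB_procKey row) (st.1, ([] : List String))) (cand, act)).1 k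
       = if k ∈ act then ((rows.map (fun r => PySem.Dict.get? r k)).foldl pvPhi (PySem.Dict.get? cand k, false)).1
         else PySem.Dict.get? cand k := by
  induction rows with
  | nil => intro cand act hnd; constructor
           · simp
           · intro k; by_cases hk : k ∈ act <;> simp [hk]
  | cons r t ih =>
    intro cand act hnd
    simp only [List.foldl_cons, List.map_cons]
    have hstep : act.foldl (pvB_procKey r) (cand, ([] : List String))
        = ((act.foldl (pvB_procKey r) (cand, ([] : List String))).1,
           act.filter (fun k => !(pvPhi (PySem.Dict.get? cand k, false) (PySem.Dict.get? r k)).2)) := by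
      rw [Prod.ext_iff]
      exact ⟨rfl, by simpa using pvRow_snd r act hnd cand []⟩
    rw [hstep]
    set cand1 := (act.foldl (pvB_procKey r) (cand, ([] : List String))).1 with hcand1
    set act1 := act.filter (fun k => !(pvPhi (PySem.Dict.get? cand k, false) (PySem.Dict.get? r k)).2) with hact1
    have hnd1 : act1.Nodup := hnd.filter _
    have hc1 : ∀ k, PySem.Dict.get? cand1 k
        = if k ∈ act then (pvPhi (PySem.Dict.get? cand k, false) (PySem.Dict.get? r k)).1
          else PySem.Dict.get? cand k := fun k => pvRow_fst r act hnd cand [] k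
    obtain ⟨iha, ihb⟩ := ih cand1 act1 hnd1
    constructor
    · rw [iha, hact1, List.filter_filter]
      apply List.filter_congr
      intro k hkact
      by_cases h1 : (pvPhi (PySem.Dict.get? cand k, false) (PySem.Dict.get? r k)).2
      · -- frozen after the first row: the tail fold stays frozen
        have : pvPhi (PySem.Dict.get? cand k, false) (PySem.Dict.get? r k)
            = ((pvPhi (PySem.Dict.get? cand k, false) (PySem.Dict.get? r k)).1, true) := by
          rw [Prod.ext_iff]; exact ⟨rfl, h1⟩
        rw [this, pvPhi_frozen (((pvPhi (PySem.Dict.get? cand k, false) (PySem.Dict.get? r k)).1, true)) rfl]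
        simp [h1]
      · have hc1k : PySem.Dict.get? cand1 k = (pvPhi (PySem.Dict.get? cand k, false) (PySem.Dict.get? r k)).1 := by
          rw [hc1 k, if_pos hkact]
        have hs1 : pvPhi (PySem.Dict.get? cand k, false) (PySem.Dict.get? r k)
            = (PySem.Dict.get? cand1 k, false) := by
          rw [Prod.ext_iff, hc1k]
          exact ⟨rfl, by simpa using h1⟩
        rw [hs1]
        simp [h1]
    · intro k
      rw [ihb k]
      by_cases hkact : k ∈ act
      · by_cases h1 : (pvPhi (PySem.Dict.get? cand k, false) (PySem.Dict.get? r k)).2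
        · have hmem1 : k ∉ act1 := by rw [hact1]; simp [h1]
          rw [if_neg hmem1, if_pos hkact, hc1 k, if_pos hkact]
          have : pvPhi (PySem.Dict.get? cand k, false) (PySem.Dict.get? r k)
              = ((pvPhi (PySem.Dict.get? cand k, false) (PySem.Dict.get? r k)).1, true) := by
            rw [Prod.ext_iff]; exact ⟨rfl, h1⟩
          rw [this, pvPhi_frozen (((pvPhi (PySem.Dict.get? cand k, false) (PySem.Dict.get? r k)).1, true)) rfl]
        · have hmem1 : k ∈ act1 := by rw [hact1]; simp [hkact, h1]
          have hc1k : PySem.Dict.get? cand1 k = (pvPhi (PySem.Dict.get? cand k, false) (PySem.Dict.get? r k)).1 := by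
            rw [hc1 k, if_pos hkact]
          rw [if_pos hmem1, if_pos hkact]
          have hs1 : pvPhi (PySem.Dict.get? cand k, false) (PySem.Dict.get? r k)
              = (PySem.Dict.get? cand1 k, false) := by
            rw [Prod.ext_iff, hc1k]
            exact ⟨rfl, by simpa using h1⟩
          rw [hs1, hc1k]
      · have hmem1 : k ∉ act1 := fun h => hkact (List.mem_of_mem_filter h)
        rw [if_neg hmem1, if_neg hkact, hc1 k, if_neg hkact]

-- iterating metadata.keys() and looking each patient up is iterating metadata.values()
lemma keys_lookup_eq_values {ν α : Type} (d : PySem.Dict String ν) (hnd : (PySem.Dict.keys d).Nodup)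
    (g : ν → Option α) :
    (PySem.Dict.keys d).map (fun p => (PySem.Dict.get? d p).bind g)
      = (PySem.Dict.values d).map g := by
  simp only [PySem.Dict.keys, PySem.Dict.values, List.map_map] at *
  apply List.map_congr_left
  intro x hx
  obtain ⟨k1, v1⟩ := x
  have : PySem.Dict.get? d k1 = some v1 := PySem.Dict.get?_of_mem_items d hx hnd
  simp [this]

-- ===== VERDICT (by name: the statement is the Claim_ definition above) =====
theorem get_trivial_keys_spec : Claim_equal_get_trivial_keys := by
  intro keys metadata _ _
  unfold Spec_get_trivial_keys get_trivial_keys get_trivial_keys_alt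
  congr 1
  apply PySem.List.foldl_congr_mem'
  intro k hk tk
  have hnd : (PySem.Dict.keys (pvMd metadata)).Nodup := by
    unfold pvMd; exact PySem.Dict.nodup_keys_ofList _
  have hops := keys_lookup_eq_values (pvMd metadata) hnd (fun d => PySem.Dict.get? d k)
  have hA := pvA_inner_phi (pvMd metadata) k (PySem.Dict.keys (pvMd metadata)) none
  rw [hops] at hA
  set s := ((PySem.Dict.values (pvMd metadata)).map (fun r => PySem.Dict.get? r k)).foldl pvPhi (none, false) with hs
  obtain ⟨ha2, hb2⟩ := pvOuter (PySem.Dict.values (pvMd metadata)) PySem.Dict.empty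
    (PySem.List.dedup keys) (PySem.List.nodup_dedup keys)
  simp only [PySem.Dict.get?_empty] at ha2 hb2
  have hkd : k ∈ PySem.List.dedup keys := (PySem.List.mem_dedup keys k).mpr hk
  have hget : PySem.Dict.get? (pvB_state keys metadata).1 k = s.1 := by
    rw [pvB_state, hb2 k, if_pos hkd, hs]
  have hmem : k ∈ (pvB_state keys metadata).2 ↔ s.2 = false := by
    rw [pvB_state, ha2, List.mem_filter]
    constructor
    · intro h; simpa using h.2
    · intro h; exact ⟨hkd, by simpa using h⟩
  have hcont : PySem.Set.contains (PySem.Set.ofList (pvB_state keys metadata).2) k = !s.2 := by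
    have : k ∈ PySem.Set.ofList (pvB_state keys metadata).2 ↔ s.2 = false := by
      rw [PySem.Set.mem_ofList]; exact hmem
    cases h2 : s.2 <;> simp_all [PySem.Set.contains]
  obtain ⟨hflag, hval⟩ := hA
  rcases hr : pvA_inner (pvMd metadata) k (PySem.Dict.keys (pvMd metadata)) none with ⟨b, o⟩
  rw [hr] at hflag hval
  simp only at hflag hval
  rw [hcont, hget]
  cases b with
  | false =>
    have h2 : s.2 = true := by
      cases h2 : s.2
      · rw [h2] at hflag; simp at hflag
      · rfl
    simp [h2]
  | true =>
    have h2 : s.2 = false := by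
      cases h2 : s.2
      · rfl
      · rw [h2] at hflag; simp at hflag
    have hv : o = s.1 := hval rfl
    rw [h2, hv]
    cases s.1 <;> simp
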